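-- pv_equiv track=rewrite | github.com/pwnaoj/obs_layer_sorsimple | src/obs_layer_sorsimple_mbaas/common/utils/jmespath.py | _extract_list_projections
-- ===== SOURCE A (Python) =====
-- from typing import List, Dict, Any, Tuple, Optional, Generator
--
-- def _extract_list_projections(type_at_levels: dict) -> Dict[str, List[str]]:
--     """Extrae las proyecciones de lista del análisis de tipos."""
--     list_projections = {}
--
--     for key, value in type_at_levels.items():
--         if value == "list projection":
--             parts = key.split('[*].')
--             if len(parts) == 2:
--                 parent, child = parts
--                 if parent not in list_projections:
--                     list_projections[parent] = []
--                 list_projections[parent].append(child)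
--
--     return list_projections
-- ===== SOURCE B (Python) =====
-- def _extract_list_projections(type_at_levels: dict):
--     """Two-phase re-implementation: first collect the (parent, child) pairs,
--     then group by scanning the pair list once per distinct parent."""
--     pairs = []
--     for key, value in type_at_levels.items():
--         if value == "list projection":
--             parts = key.split('[*].')
--             if len(parts) == 2:
--                 pairs.append((parts[0], parts[1]))
--     parents = list(dict.fromkeys(p for p, _ in pairs))
--     return {p: [c for q, c in pairs if q == p] for p in parents}
-- ===== Notes on version B (the rewrite author's own statement) =====
-- stated objective: alternative
-- what changed: Replaces the single-pass dict bucketing with a two-phase decomposition: build a flat (parent, child) pair list, dedup the parents in first-seen order, then build each group by a per-parent scan of the pair list.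
import Mathlib
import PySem

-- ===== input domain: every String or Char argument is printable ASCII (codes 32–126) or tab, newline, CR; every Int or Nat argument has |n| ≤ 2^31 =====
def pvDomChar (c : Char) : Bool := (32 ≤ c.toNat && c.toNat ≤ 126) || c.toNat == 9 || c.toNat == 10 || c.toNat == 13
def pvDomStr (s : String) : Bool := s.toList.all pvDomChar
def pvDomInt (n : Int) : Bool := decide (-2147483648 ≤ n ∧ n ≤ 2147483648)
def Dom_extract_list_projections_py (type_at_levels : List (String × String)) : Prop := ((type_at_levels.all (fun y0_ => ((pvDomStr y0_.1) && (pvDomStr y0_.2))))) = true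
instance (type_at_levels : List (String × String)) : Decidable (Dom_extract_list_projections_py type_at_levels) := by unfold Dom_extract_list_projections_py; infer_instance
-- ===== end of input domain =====

-- B groups the same (parent, child) pairs by a two-phase pair-list scan instead of A's
-- single-pass dict bucketing; alternative decomposition, same return value.

-- ===== PORT A =====
-- key.split('[*].') with a nonempty separator: Str.split? is always `some` here, `.getD []` extracts its exact value
def extract_list_projections_py (type_at_levels : List (String × String)) : List (String × List String) :=
  (type_at_levels.foldl (fun d kv =>
      if kv.2 = "list projection" then
        let parts := (PySem.Str.split? kv.1 "[*].").getD []
        if parts.length = 2 then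
          d.modify (parts[0]!) [] (fun l => l ++ [parts[1]!])
        else d
      else d) PySem.Dict.empty).items

-- ===== PORT B =====
def extract_list_projections_py_alt (type_at_levels : List (String × String)) : List (String × List String) :=
  let pairs := type_at_levels.foldl (fun acc kv =>
      if kv.2 = "list projection" then
        match (PySem.Str.split? kv.1 "[*].").getD [] with
        | [p, c] => acc ++ [(p, c)]
        | _ => acc
      else acc) []
  let parents := PySem.List.dedup (pairs.map (·.1))
  parents.map (fun p => (p, (pairs.filter (fun q => q.1 == p)).map (·.2)))

-- ===== PRECONDITION & SPEC =====
def Spec_extract_list_projections_py (type_at_levels : List (String × String)) (out : List (String × List String)) : Prop := out = extract_list_projections_py_alt type_at_levels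
instance (type_at_levels : List (String × String)) (out : List (String × List String)) : Decidable (Spec_extract_list_projections_py type_at_levels out) := by unfold Spec_extract_list_projections_py; infer_instance

-- ===== CLAIM (what is proved, stated in full; the proofs are below) =====
def Claim_equal_extract_list_projections_py : Prop := ∀ (type_at_levels : List (String × String)), Dom_extract_list_projections_py type_at_levels → Spec_extract_list_projections_py type_at_levels (extract_list_projections_py type_at_levels)

-- ===== LEMMAS AND PROOFS =====

/-- Proof-side view of one loop iteration: the (parent, child) pair a matching entry yields. -/
def pvParse (kv : String × String) : Option (String × String) :=
  if kv.2 = "list projection" then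
    match (PySem.Str.split? kv.1 "[*].").getD [] with
    | [p, c] => some (p, c)
    | _ => none
  else none

theorem pv_b_pairs (tal : List (String × String)) (acc : List (String × String)) :
    tal.foldl (fun acc kv =>
      if kv.2 = "list projection" then
        match (PySem.Str.split? kv.1 "[*].").getD [] with
        | [p, c] => acc ++ [(p, c)]
        | _ => acc
      else acc) acc = acc ++ tal.filterMap pvParse := by
  induction tal generalizing acc with
  | nil => simp
  | cons kv t ih =>
    rw [List.foldl_cons, List.filterMap_cons]
    by_cases hv : kv.2 = "list projection"
    · have hp : pvParse kv = (match (PySem.Str.split? kv.1 "[*].").getD [] with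
          | [p, c] => some (p, c)
          | _ => none) := by rw [pvParse, if_pos hv]
      rcases hs : (PySem.Str.split? kv.1 "[*].").getD [] with _ | ⟨p, _ | ⟨c, _ | ⟨x, xs⟩⟩⟩ <;>
        · rw [hs] at hp
          simp only [if_pos hv, hp]
          simp [ih]
    · have hp : pvParse kv = none := by rw [pvParse, if_neg hv]
      rw [if_neg hv, hp, ih]

theorem pv_a_fold (tal : List (String × String)) (d : PySem.Dict String (List String)) :
    tal.foldl (fun d kv =>
      if kv.2 = "list projection" then
        let parts := (PySem.Str.split? kv.1 "[*].").getD []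
        if parts.length = 2 then
          d.modify (parts[0]!) [] (fun l => l ++ [parts[1]!])
        else d
      else d) d
    = (tal.filterMap pvParse).foldl (fun d p => d.modify p.1 [] (fun l => l ++ [p.2])) d := by
  induction tal generalizing d with
  | nil => simp
  | cons kv t ih =>
    rw [List.foldl_cons, List.filterMap_cons]
    by_cases hv : kv.2 = "list projection"
    · have hp : pvParse kv = (match (PySem.Str.split? kv.1 "[*].").getD [] with
          | [p, c] => some (p, c)
          | _ => none) := by rw [pvParse, if_pos hv]
      rcases hs : (PySem.Str.split? kv.1 "[*].").getD [] with _ | ⟨p, _ | ⟨c, _ | ⟨x, xs⟩⟩⟩ <;>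
        · rw [hs] at hp
          simp only [if_pos hv, hp]
          exact ih _
    · have hp : pvParse kv = none := by rw [pvParse, if_neg hv]
      rw [if_neg hv, hp, ih]

-- ===== VERDICT (by name: the statement is the Claim_ definition above) =====
theorem extract_list_projections_py_spec : Claim_equal_extract_list_projections_py := by
  intro tal _
  unfold Spec_extract_list_projections_py extract_list_projections_py extract_list_projections_py_alt
  rw [pv_a_fold, pv_b_pairs]
  simp only [List.nil_append]
  set ps := tal.filterMap pvParse with hps
  have hnd : (ps.foldl (fun d p => d.modify p.1 [] (fun l => l ++ [p.2])) PySem.Dict.empty).keys.Nodup :=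
    PySem.Dict.nodup_keys_foldl_modify_key ps (·.1) [] (fun _ p => fun l => l ++ [p.2])
      PySem.Dict.empty (by simp)
  rw [PySem.Dict.items_eq_map_keys _ hnd ([] : List String)]
  rw [PySem.Dict.keys_foldl_modify_key]
  simp only [PySem.Dict.keys_empty, PySem.Set.update_nil_left, PySem.List.dedup_eq_ofList]
  apply List.map_congr_left
  intro p _
  rw [PySem.Dict.getD_foldl_modify_append]
  simp
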